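-- pv_equiv track=rewrite | github.com/NREL/openstudio-gems | create_cmakelist_diff.py | get_block_location
-- ===== SOURCE A (Python) =====
-- from typing import List, Optional, Tuple
--
-- def get_block_location(cmake_lines: List[str]) -> Tuple[int, int]:
--     start_i = None
--     end_i = None
--     for i, line in enumerate(cmake_lines):
--         if start_i is None and "OPENSTUDIO_GEMS_BASEURL" in line:
--             start_i = i
--             continue
--         if start_i is not None:
--             if "OPENSTUDIO_GEMS_ZIP_LOCAL_PATH" in line:
--                 end_i = i
--                 break
--     assert start_i is not None and end_i is not None
--     return [start_i, end_i]
-- ===== SOURCE B (Python) =====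
-- from typing import List, Tuple
--
-- def get_block_location(cmake_lines: List[str]) -> Tuple[int, int]:
--     # Collect ALL marker indices first (full scans, no early exit), then select.
--     starts = [i for i, line in enumerate(cmake_lines)
--               if "OPENSTUDIO_GEMS_BASEURL" in line]
--     ends = [i for i, line in enumerate(cmake_lines)
--             if "OPENSTUDIO_GEMS_ZIP_LOCAL_PATH" in line]
--     assert starts
--     start_i = starts[0]
--     after = [j for j in ends if j > start_i]
--     assert after
--     return [start_i, after[0]]
-- ===== Notes on version B (the rewrite author's own statement) =====
-- stated objective: alternative
-- what changed: Instead of A's single stateful scan with continue/break, B materialises the complete lists of all start-marker and all end-marker indices via comprehensions (no early exit), then selects the first start index and the first collected end index greater than it.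
import Mathlib
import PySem

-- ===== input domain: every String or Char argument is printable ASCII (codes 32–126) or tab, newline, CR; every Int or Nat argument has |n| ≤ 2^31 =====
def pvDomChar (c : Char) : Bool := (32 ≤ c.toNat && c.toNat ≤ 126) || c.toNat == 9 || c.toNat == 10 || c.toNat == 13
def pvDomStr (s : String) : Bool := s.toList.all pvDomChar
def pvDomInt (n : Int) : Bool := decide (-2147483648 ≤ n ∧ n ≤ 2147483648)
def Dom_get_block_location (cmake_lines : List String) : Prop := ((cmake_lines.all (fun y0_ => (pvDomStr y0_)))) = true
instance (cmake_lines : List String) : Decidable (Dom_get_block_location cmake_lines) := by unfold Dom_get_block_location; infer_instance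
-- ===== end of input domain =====

-- ===== PORT A =====
-- B changes the algorithmic shape: collect ALL marker indices (full scans, no break), then select; same cost.
def pvLoopA : List String → Nat → Option Nat → Int × Int
  | [], _, _ => (-1, -1)          -- assert fails in Python (outside Pre_)
  | line :: rest, i, none =>
      if PySem.Str.isIn "OPENSTUDIO_GEMS_BASEURL" line then pvLoopA rest (i+1) (some i)
      else pvLoopA rest (i+1) none
  | line :: rest, i, some s =>
      if PySem.Str.isIn "OPENSTUDIO_GEMS_ZIP_LOCAL_PATH" line then ((s : Int), (i : Int))
      else pvLoopA rest (i+1) (some s)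

def get_block_location (cmake_lines : List String) : Int × Int :=
  pvLoopA cmake_lines 0 none

-- ===== PORT B =====
-- comprehension [i for i, line in enumerate(...) if "OPENSTUDIO_GEMS_BASEURL" in line], counter i
def pvStarts : List String → Nat → List Nat
  | [], _ => []
  | line :: rest, i =>
      if PySem.Str.isIn "OPENSTUDIO_GEMS_BASEURL" line then i :: pvStarts rest (i+1)
      else pvStarts rest (i+1)

-- comprehension [i for i, line in enumerate(...) if "OPENSTUDIO_GEMS_ZIP_LOCAL_PATH" in line]
def pvEnds : List String → Nat → List Nat
  | [], _ => []
  | line :: rest, i =>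
      if PySem.Str.isIn "OPENSTUDIO_GEMS_ZIP_LOCAL_PATH" line then i :: pvEnds rest (i+1)
      else pvEnds rest (i+1)

def get_block_location_alt (cmake_lines : List String) : Int × Int :=
  match pvStarts cmake_lines 0 with
  | [] => (-1, -1)                -- assert fails in Python (outside Pre_)
  | s :: _ =>
      match (pvEnds cmake_lines 0).filter (fun j => decide (s < j)) with
      | [] => (-1, -1)            -- assert fails in Python (outside Pre_)
      | e :: _ => ((s : Int), (e : Int))

-- ===== PRECONDITION & SPEC =====
-- Pre_ excludes exactly the inputs on which A raises AssertionError (no start marker, or no end marker strictly after it).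
def Pre_get_block_location (cmake_lines : List String) : Prop :=
  ∃ i < cmake_lines.length, ∃ j < cmake_lines.length, i < j ∧
    PySem.Str.isIn "OPENSTUDIO_GEMS_BASEURL" (cmake_lines.getD i "") = true ∧
    PySem.Str.isIn "OPENSTUDIO_GEMS_ZIP_LOCAL_PATH" (cmake_lines.getD j "") = true
instance (cmake_lines : List String) : Decidable (Pre_get_block_location cmake_lines) := by
  unfold Pre_get_block_location; infer_instance

def pvWitness_get_block_location : List String :=
  ["set(OPENSTUDIO_GEMS_BASEURL \"http://x\")", "set(OPENSTUDIO_GEMS_ZIP_LOCAL_PATH y)"]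

def Spec_get_block_location (cmake_lines : List String) (out : Int × Int) : Prop := out = get_block_location_alt cmake_lines
instance (cmake_lines : List String) (out : Int × Int) : Decidable (Spec_get_block_location cmake_lines out) := by unfold Spec_get_block_location; infer_instance

-- ===== CLAIM (what is proved, stated in full; the proofs are below) =====
def Claim_equal_get_block_location : Prop := ∀ (cmake_lines : List String), Dom_get_block_location cmake_lines → Pre_get_block_location cmake_lines → Spec_get_block_location cmake_lines (get_block_location cmake_lines)

-- ===== LEMMAS AND PROOFS =====

-- first-match views of B's collected lists
def pvFindZip : List String → Nat → Option Nat
  | [], _ => none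
  | line :: rest, j =>
      if PySem.Str.isIn "OPENSTUDIO_GEMS_ZIP_LOCAL_PATH" line then some j else pvFindZip rest (j+1)

theorem pvEnds_head (l : List String) (i : Nat) : (pvEnds l i).head? = pvFindZip l i := by
  induction l generalizing i with
  | nil => rfl
  | cons line rest ih =>
      simp only [pvEnds, pvFindZip]
      split_ifs with h
      · rfl
      · exact ih (i + 1)

theorem pvEnds_ge (l : List String) (i : Nat) : ∀ j ∈ pvEnds l i, i ≤ j := by
  induction l generalizing i with
  | nil => intro j h; simp [pvEnds] at h
  | cons line rest ih =>
      intro j h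
      simp only [pvEnds] at h
      split_ifs at h with hb
      · rcases List.mem_cons.1 h with rfl | h
        · omega
        · have := ih (i + 1) j h; omega
      · have := ih (i + 1) j h; omega

-- A's loop after the start marker was found at index s is B's search over the remaining suffix.
theorem pvLoopA_some (l : List String) (i s : Nat) :
    pvLoopA l i (some s) =
      match pvFindZip l i with
      | none => (-1, -1)
      | some e => ((s : Int), (e : Int)) := by
  induction l generalizing i with
  | nil => rfl
  | cons line rest ih =>
      simp only [pvLoopA, pvFindZip]
      split_ifs with h
      · rfl
      · exact ih (i + 1)

-- B's "all end indices > s" selection agrees with the first zip match in the suffix after s.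
theorem pvEnds_filter_head (l : List String) (s : Nat) :
    ∀ i ≤ s + 1, ((pvEnds l i).filter (fun j => decide (s < j))).head? =
      pvFindZip (l.drop (s + 1 - i)) (s + 1) := by
  induction l with
  | nil => intro i _; simp [pvEnds, pvFindZip]
  | cons line rest ih =>
      intro i hi
      by_cases he : i = s + 1
      · subst he
        have hall : (pvEnds (line :: rest) (s+1)).filter (fun j => decide (s < j))
            = pvEnds (line :: rest) (s+1) := by
          apply List.filter_eq_self.2
          intro j hj
          have := pvEnds_ge (line :: rest) (s+1) j hj
          simp; omega
        rw [hall]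
        simp only [Nat.sub_self, List.drop_zero]
        exact pvEnds_head _ _
      · have hle : i ≤ s := by omega
        have hd : (line :: rest).drop (s + 1 - i) = rest.drop (s + 1 - (i + 1)) := by
          have h1 : s + 1 - i = (s + 1 - (i + 1)) + 1 := by omega
          rw [h1]; rfl
        rw [hd]
        simp only [pvEnds]
        split_ifs with hb
        · have hfi : decide (s < i) = false := by simp; omega
          rw [List.filter_cons_of_neg (by simp [hfi])]
          exact ih (i + 1) (by omega)
        · exact ih (i + 1) (by omega)

theorem pvStarts_head_ge (l : List String) (i s : Nat)
    (h : (pvStarts l i).head? = some s) : i ≤ s := by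
  induction l generalizing i with
  | nil => simp [pvStarts] at h
  | cons line rest ih =>
      simp only [pvStarts] at h
      split_ifs at h with hb
      · simp at h; omega
      · have := ih (i + 1) h; omega

-- A's whole loop equals B's two-stage selection (indices relative to the counter i).
theorem pvLoopA_none (l : List String) (i : Nat) :
    pvLoopA l i none =
      match (pvStarts l i).head? with
      | none => (-1, -1)
      | some s =>
          match pvFindZip (l.drop (s + 1 - i)) (s + 1) with
          | none => (-1, -1)
          | some e => ((s : Int), (e : Int)) := by
  induction l generalizing i with
  | nil => rfl
  | cons line rest ih =>
      simp only [pvLoopA, pvStarts]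
      split_ifs with h
      · have h1 : i + 1 - i = 1 := by omega
        simp [pvLoopA_some, h1]
      · rw [ih (i + 1)]
        cases hb : (pvStarts rest (i + 1)).head? with
        | none => rfl
        | some s =>
            have hs : i + 1 ≤ s := pvStarts_head_ge rest (i + 1) s hb
            have h2 : s + 1 - i = (s + 1 - (i + 1)) + 1 := by omega
            simp [h2]

-- ===== VERDICT (by name: the statement is the Claim_ definition above) =====
theorem get_block_location_spec : Claim_equal_get_block_location := by
  intro cmake_lines _ _
  unfold Spec_get_block_location get_block_location get_block_location_alt
  rw [pvLoopA_none]
  cases hs : (pvStarts cmake_lines 0).head? with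
  | none => cases h : pvStarts cmake_lines 0 <;> simp_all
  | some s =>
      cases h : pvStarts cmake_lines 0 with
      | nil => simp [h] at hs
      | cons s' t =>
          rw [h] at hs
          simp only [List.head?_cons, Option.some.injEq] at hs
          subst hs
          simp only []
          rw [← pvEnds_filter_head cmake_lines s' 0 (by omega)]
          cases (pvEnds cmake_lines 0).filter (fun j => decide (s' < j)) <;> simp
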